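-- pv_equiv track=rewrite | github.com/jgumbley/open-creel | stub_worker.py | find_uncovered_dns_name_additions
-- ===== SOURCE A (Python) =====
-- def normalize_dns_name(name: str) -> str:
--     return name.strip().rstrip(".").lower()
--
-- def dns_name_is_covered(name: str, existing_names: set[str]) -> bool:
--     for existing_name in existing_names:
--         if name == existing_name:
--             return True
--         if name.endswith(f".{existing_name}"):
--             return True
--     return False
--
-- def find_uncovered_dns_name_additions(dns_names: list[str]) -> tuple[list[str], list[str]]:
--     existing_names: list[str] = []
--     existing_lookup: set[str] = set()
--     new_names: list[str] = []
--
--     for dns_name in dns_names: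
--         normalized = normalize_dns_name(dns_name)
--         if not normalized or normalized in existing_lookup:
--             continue
--         if existing_lookup and not dns_name_is_covered(normalized, existing_lookup):
--             new_names.append(normalized)
--         existing_names.append(normalized)
--         existing_lookup.add(normalized)
--
--     new_name_lookup = set(new_names)
--     covered_names = [name for name in existing_names if name not in new_name_lookup]
--     return covered_names, new_names
-- ===== SOURCE B (Python) =====
-- def find_uncovered_dns_name_additions(dns_names: list[str]) -> tuple[list[str], list[str]]:
--     # Coverage query by suffix enumeration: instead of scanning every earlier name
--     # with endswith, look up each dot-boundary suffix of the current name in a hash set.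
--     seen: set[str] = set()
--     covered: list[str] = []
--     new: list[str] = []
--     for raw in dns_names:
--         name = raw.strip().rstrip(".").lower()
--         if not name or name in seen:
--             continue
--         if seen and all(name[i + 1:] not in seen for i, c in enumerate(name) if c == "."):
--             new.append(name)
--         else:
--             covered.append(name)
--         seen.add(name)
--     return covered, new
-- ===== Notes on version B (the rewrite author's own statement) =====
-- stated objective: faster
-- what changed: Coverage is decided by hash-set lookups of the name's own dot-boundary suffixes instead of scanning every earlier name with endswith, and covered/new are built directly in one pass without the new_name_lookup set and trailing filter.
import Mathlib
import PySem

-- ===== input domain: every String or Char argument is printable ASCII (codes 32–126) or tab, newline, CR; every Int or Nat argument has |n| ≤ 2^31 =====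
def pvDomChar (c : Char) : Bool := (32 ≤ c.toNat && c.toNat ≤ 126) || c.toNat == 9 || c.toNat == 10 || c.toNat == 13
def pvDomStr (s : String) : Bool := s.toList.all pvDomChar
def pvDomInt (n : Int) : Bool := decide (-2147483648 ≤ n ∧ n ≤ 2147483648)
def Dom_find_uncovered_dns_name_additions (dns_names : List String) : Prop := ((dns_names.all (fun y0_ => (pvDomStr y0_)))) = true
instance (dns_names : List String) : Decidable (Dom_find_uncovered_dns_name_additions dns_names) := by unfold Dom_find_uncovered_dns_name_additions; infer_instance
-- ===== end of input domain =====

-- B replaces A's per-name scan over all earlier names (endswith against each) by a hash-set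
-- lookup of each dot-boundary suffix of the current name, building covered/new directly in one pass.

-- ===== PORT A =====
-- name.strip().rstrip(".").lower()  — rstrip(".") ported by hand (drop trailing '.'), exact
def pvNormalize (name : String) : String :=
  String.ofList (PySem.Chars.lower
    (((PySem.Chars.strip name.toList).reverse.dropWhile (fun c => c == '.')).reverse))

-- for existing_name in existing_names: equality or dot-suffix hit returns True (order-independent any)
def pvCovered (name : String) (existing : PySem.Set String) : Bool :=
  existing.any (fun e => name == e || PySem.Str.endswith name (String.ofList ('.' :: e.toList)))

def pvStepA (st : List String × PySem.Set String × List String) (dns_name : String) :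
    List String × PySem.Set String × List String :=
  let normalized := pvNormalize dns_name
  if normalized == "" || PySem.Set.contains st.2.1 normalized then st
  else
    let nw := if !st.2.1.isEmpty && !pvCovered normalized st.2.1 then st.2.2 ++ [normalized] else st.2.2
    (st.1 ++ [normalized], PySem.Set.add st.2.1 normalized, nw)

def find_uncovered_dns_name_additions (dns_names : List String) : List String × List String :=
  let st := dns_names.foldl pvStepA ([], PySem.Set.empty, [])
  let new_name_lookup := PySem.Set.ofList st.2.2
  (st.1.filter (fun name => !PySem.Set.contains new_name_lookup name), st.2.2)

-- ===== PORT B =====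
-- all(name[i+1:] not in seen for i, c in enumerate(name) if c == ".")
-- name[i+1:] with i ≥ 0 is slice from i+1 (exact)
def pvSuffixNew (cs : List Char) (seen : PySem.Set String) : Bool :=
  ((PySem.List.enumerate cs 0).filter (fun p => p.2 == '.')).all
    (fun p => !PySem.Set.contains seen (String.ofList (PySem.List.slice cs (some (p.1 + 1)) none)))

def pvStepB (st : List String × List String × PySem.Set String) (raw : String) :
    List String × List String × PySem.Set String :=
  let name := pvNormalize raw
  if name == "" || PySem.Set.contains st.2.2 name then st
  else if !st.2.2.isEmpty && pvSuffixNew name.toList st.2.2 then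
    (st.1, st.2.1 ++ [name], PySem.Set.add st.2.2 name)
  else
    (st.1 ++ [name], st.2.1, PySem.Set.add st.2.2 name)

def find_uncovered_dns_name_additions_alt (dns_names : List String) : List String × List String :=
  let r := dns_names.foldl pvStepB ([], [], PySem.Set.empty)
  (r.1, r.2.1)

-- ===== PRECONDITION & SPEC =====
def Spec_find_uncovered_dns_name_additions (dns_names : List String) (out : List String × List String) : Prop := out = find_uncovered_dns_name_additions_alt dns_names
instance (dns_names : List String) (out : List String × List String) : Decidable (Spec_find_uncovered_dns_name_additions dns_names out) := by unfold Spec_find_uncovered_dns_name_additions; infer_instance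

-- ===== CLAIM (what is proved, stated in full; the proofs are below) =====
def Claim_equal_find_uncovered_dns_name_additions : Prop := ∀ (dns_names : List String), Dom_find_uncovered_dns_name_additions dns_names → Spec_find_uncovered_dns_name_additions dns_names (find_uncovered_dns_name_additions dns_names)

-- ===== LEMMAS AND PROOFS =====

-- '.'-prefixed suffixes of cs are exactly the tails after a '.' character
theorem pvDotSuffix_iff (cs e : List Char) :
    ('.' :: e) <:+ cs ↔ ∃ (k : Nat) (_ : k < cs.length), cs[k] = '.' ∧ cs.drop (k + 1) = e := by
  constructor
  · rintro ⟨t, rfl⟩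
    refine ⟨t.length, by simp, ?_, ?_⟩
    · simp
    · rw [show t ++ '.'::e = (t ++ ['.']) ++ e by simp,
          show t.length + 1 = (t ++ ['.']).length by simp, List.drop_left]
  · rintro ⟨k, hk, hc, hd⟩
    refine ⟨cs.take k, ?_⟩
    rw [← hd, ← hc]
    rw [← List.drop_eq_getElem_cons hk]
    exact List.take_append_drop k cs

-- A's inner scan equals the negation of B's suffix-enumeration test (m not yet in seen)
theorem pvCov_eq (m : String) (s : PySem.Set String) (hm : m ∉ s) :
    pvCovered m s = !(pvSuffixNew m.toList s) := by
  refine Bool.eq_iff_iff.mpr ?_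
  unfold pvCovered pvSuffixNew
  simp only [Bool.not_eq_true', List.all_eq_false, List.any_eq_true, List.mem_filter,
    beq_iff_eq, Bool.or_eq_true]
  constructor
  · rintro ⟨e, he, heq | hsuf⟩
    · exact absurd (heq ▸ he) hm
    · have hsfx : ('.' :: e.toList) <:+ m.toList := by
        rw [← PySem.Chars.endswith_iff]
        simpa using hsuf
      obtain ⟨k, hk, hc, hd⟩ := (pvDotSuffix_iff _ _).mp hsfx
      refine ⟨((k : Int), '.'), ⟨?_, rfl⟩, ?_⟩
      · rw [PySem.List.mem_enumerate_iff]
        exact ⟨k, hk, by simp [hc]⟩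
      · have hs : PySem.List.slice m.toList (some ((k : Int) + 1)) none = m.toList.drop (k + 1) := by
          rw [show ((k : Int) + 1) = ((k + 1 : Nat) : Int) by push_cast; ring,
             PySem.List.slice_from_natCast]
        simp only [hs, hd]
        simp [PySem.Set.contains_eq_listContains, he]
  · rintro ⟨⟨i, c⟩, ⟨hen, hdot⟩, hin⟩
    rw [PySem.List.mem_enumerate_iff] at hen
    obtain ⟨k, hk, hpk⟩ := hen
    have hi : i = (0 : Int) + (k : Int) := congrArg Prod.fst hpk
    have hs : PySem.List.slice m.toList (some (i + 1)) none = m.toList.drop (k + 1) := by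
      rw [hi, show ((0 : Int) + (k : Int) + 1) = ((k + 1 : Nat) : Int) by push_cast; ring,
         PySem.List.slice_from_natCast]
    rw [hs] at hin
    set e := String.ofList (m.toList.drop (k + 1)) with hedef
    have hein : e ∈ s := by
      rw [PySem.Set.contains_eq_listContains] at hin
      simpa using hin
    refine ⟨e, hein, Or.inr ?_⟩
    have hc : m.toList[k] = '.' := by
      have hsn : c = m.toList[k] := congrArg Prod.snd hpk
      exact hsn.symm.trans hdot
    have hsfx : ('.' :: e.toList) <:+ m.toList :=
      (pvDotSuffix_iff _ _).mpr ⟨k, hk, hc, by simp [hedef]⟩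
    simp only [PySem.Str.endswith_eq]
    rw [show (String.ofList ('.' :: e.toList)).toList = '.' :: e.toList by simp]
    exact (PySem.Chars.endswith_iff _ _).mpr hsfx

theorem pvMain (l : List String) (ex nw cov : List String) (s : PySem.Set String)
    (h1 : s = ex)
    (h2 : cov = ex.filter (fun n => !nw.contains n))
    (h4 : ∀ x ∈ nw, x ∈ ex) :
    l.foldl pvStepB (cov, nw, s)
      = (((l.foldl pvStepA (ex, s, nw)).1).filter
            (fun n => !((l.foldl pvStepA (ex, s, nw)).2.2).contains n),
         (l.foldl pvStepA (ex, s, nw)).2.2,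
         (l.foldl pvStepA (ex, s, nw)).2.1) := by
  induction l generalizing ex nw cov s with
  | nil =>
    simp [h2]
  | cons d t ih =>
    simp only [List.foldl_cons]
    by_cases hc : (pvNormalize d == "" || PySem.Set.contains s (pvNormalize d)) = true
    · have hA : pvStepA (ex, s, nw) d = (ex, s, nw) := by
        simp only [pvStepA]; rw [if_pos hc]
      have hB : pvStepB (cov, nw, s) d = (cov, nw, s) := by
        simp only [pvStepB]; rw [if_pos hc]
      rw [hA, hB]
      exact ih ex nw cov s h1 h2 h4
    · set m := pvNormalize d with hm
      have hc' := hc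
      simp only [Bool.or_eq_true, not_or, Bool.not_eq_true] at hc'
      obtain ⟨hne, hnc⟩ := hc'
      have hmem : m ∉ ex := by
        have h := hnc
        rw [PySem.Set.contains_eq_listContains, h1] at h
        simpa using h
      have hmemS : m ∉ s := h1 ▸ hmem
      have hadd : PySem.Set.add s m = ex ++ [m] := by
        rw [PySem.Set.add_eq_ite]
        rw [if_neg (by rw [h1]; exact hmem), h1]
      have hA : pvStepA (ex, s, nw) d
          = (ex ++ [m], PySem.Set.add s m,
             if !s.isEmpty && !pvCovered m s then nw ++ [m] else nw) := by
        simp only [pvStepA]; rw [if_neg (by simp_all)]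
      have hcov : (!s.isEmpty && pvSuffixNew m.toList s) = (!s.isEmpty && !pvCovered m s) := by
        rw [pvCov_eq m s hmemS, Bool.not_not]
      by_cases hb : (!s.isEmpty && pvSuffixNew m.toList s) = true
      · -- new branch: both append m to new
        have hB : pvStepB (cov, nw, s) d = (cov, nw ++ [m], PySem.Set.add s m) := by
          simp only [pvStepB]
          rw [if_neg (by simp_all), if_pos hb]
        have hAn : (if !s.isEmpty && !pvCovered m s then nw ++ [m] else nw) = nw ++ [m] := by
          rw [← hcov, hb]; rfl
        rw [hA, hB, hAn, hadd]
        apply ih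
        · rfl
        · rw [List.filter_append]
          have h1' : ex.filter (fun n => !(nw ++ [m]).contains n)
              = ex.filter (fun n => !nw.contains n) := by
            apply List.filter_congr
            intro n hn
            simp only [List.contains_append]
            simp
            exact fun _ he => hmem (he ▸ hn)
          have h2' : [m].filter (fun n => !(nw ++ [m]).contains n) = [] := by
            simp
          rw [h1', h2', ← h2, List.append_nil]
        · intro x hx
          rcases List.mem_append.mp hx with h | h
          · exact List.mem_append_left _ (h4 x h)
          · exact List.mem_append_right _ h
      · -- covered branch: B appends m to covered, A does not add to new
        have hB : pvStepB (cov, nw, s) d = (cov ++ [m], nw, PySem.Set.add s m) := by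
          simp only [pvStepB]
          rw [if_neg (by simp_all), if_neg hb]
        have hAn : (if !s.isEmpty && !pvCovered m s then nw ++ [m] else nw) = nw := by
          rw [← hcov, if_neg hb]
        rw [hA, hB, hAn, hadd]
        apply ih
        · rfl
        · rw [List.filter_append, ← h2]
          have hmn : m ∉ nw := fun h => hmem (h4 m h)
          simp [hmn]
        · intro x hx
          exact List.mem_append_left _ (h4 x hx)

theorem pvBridge (l : List String) :
    find_uncovered_dns_name_additions l = find_uncovered_dns_name_additions_alt l := by
  have h := pvMain l [] [] [] PySem.Set.empty rfl rfl (by intro x hx; cases hx)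
  unfold find_uncovered_dns_name_additions find_uncovered_dns_name_additions_alt
  dsimp only
  rw [h]
  refine Prod.ext ?_ rfl
  simp only
  apply List.filter_congr
  intro n _
  congr 1
  refine Bool.eq_iff_iff.mpr ?_
  simp [PySem.Set.mem_ofList]

-- ===== VERDICT (by name: the statement is the Claim_ definition above) =====
theorem find_uncovered_dns_name_additions_spec : Claim_equal_find_uncovered_dns_name_additions := by
  intro dns_names _
  unfold Spec_find_uncovered_dns_name_additions
  exact pvBridge dns_names
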